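-- pv_equiv track=rewrite | github.com/wunderwald/Multiverse_Study | RSA_Epochs/rsa_epoch.py | split_ibi_epochs
-- ===== SOURCE A (Python) =====
-- def split_ibi_epochs(ibi_ms, epoch_length_ms):
--     epochs = []
--     current_epoch = []
--     ibi_sum = 0
--     for ibi_sample in ibi_ms:
--         new_sum = ibi_sum + ibi_sample
--         if new_sum > epoch_length_ms:
--             # current epoch is done
--             epochs.append(current_epoch)
--             ibi_sum = ibi_sample
--             current_epoch = [ibi_sample]
--             continue
--         # append to current epoch
--         current_epoch.append(ibi_sample)
--         ibi_sum = new_sum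
--     if(len(current_epoch) > 0):
--         epochs.append(current_epoch)
--     return epochs
-- ===== SOURCE B (Python) =====
-- def split_ibi_epochs(ibi_ms, epoch_length_ms):
--     # One pass records only the index where each epoch starts; the epochs
--     # themselves are reconstructed afterwards by slicing between boundaries.
--     if not ibi_ms:
--         return []
--     starts = [0]
--     acc = 0
--     for i, x in enumerate(ibi_ms):
--         if acc + x > epoch_length_ms:
--             starts.append(i)
--             acc = x
--         else:
--             acc = acc + x
--     return [ibi_ms[a:b] for a, b in zip(starts, starts[1:] + [len(ibi_ms)])]
-- ===== Notes on version B (the rewrite author's own statement) =====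
-- stated objective: alternative
-- what changed: B makes one pass recording only the start index of each epoch and then rebuilds the epochs by slicing the input between consecutive boundary indices, instead of accumulating the epoch sublists inside the scan.
import Mathlib
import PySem

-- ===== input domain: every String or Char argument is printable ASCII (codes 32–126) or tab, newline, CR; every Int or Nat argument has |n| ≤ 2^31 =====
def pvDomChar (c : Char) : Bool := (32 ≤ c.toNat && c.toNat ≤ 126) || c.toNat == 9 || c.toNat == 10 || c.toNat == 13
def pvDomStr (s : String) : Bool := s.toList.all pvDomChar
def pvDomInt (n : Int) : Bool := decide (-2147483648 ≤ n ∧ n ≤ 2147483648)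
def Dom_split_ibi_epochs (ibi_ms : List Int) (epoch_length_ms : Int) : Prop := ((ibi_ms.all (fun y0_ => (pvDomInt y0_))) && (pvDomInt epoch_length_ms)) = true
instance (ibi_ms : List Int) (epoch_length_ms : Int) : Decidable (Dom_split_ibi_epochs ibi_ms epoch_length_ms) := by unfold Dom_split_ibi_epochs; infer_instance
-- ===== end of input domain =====

-- B records only epoch-start indices in one pass and rebuilds the epochs by slicing
-- between consecutive boundaries (alternative decomposition, same cost).


-- ===== PORT A =====
-- state st = (epochs, current_epoch, ibi_sum)
def split_ibi_epochs (ibi_ms : List Int) (epoch_length_ms : Int) : List (List Int) :=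
  let st := ibi_ms.foldl
    (fun (st : List (List Int) × List Int × Int) (ibi_sample : Int) =>
      let new_sum := st.2.2 + ibi_sample
      if new_sum > epoch_length_ms then
        (st.1 ++ [st.2.1], [ibi_sample], ibi_sample)
      else
        (st.1, st.2.1 ++ [ibi_sample], new_sum))
    (([] : List (List Int)), ([] : List Int), (0 : Int))
  if st.2.1.length > 0 then st.1 ++ [st.2.1] else st.1

-- ===== PORT B =====
-- starts[1:] is drop 1; ibi_ms[a:b] is PySem.List.slice; state s = (starts, acc)
def split_ibi_epochs_alt (ibi_ms : List Int) (epoch_length_ms : Int) : List (List Int) :=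
  if ibi_ms = [] then []
  else
    let st := (PySem.List.enumerate ibi_ms).foldl
      (fun (s : List Int × Int) (ix : Int × Int) =>
        if s.2 + ix.2 > epoch_length_ms then (s.1 ++ [ix.1], ix.2)
        else (s.1, s.2 + ix.2))
      (([(0 : Int)], (0 : Int)))
    ((st.1).zip ((st.1).drop 1 ++ [(ibi_ms.length : Int)])).map
      (fun ab => PySem.List.slice ibi_ms (some ab.1) (some ab.2))

-- ===== PRECONDITION & SPEC =====
def Spec_split_ibi_epochs (ibi_ms : List Int) (epoch_length_ms : Int) (out : List (List Int)) : Prop := out = split_ibi_epochs_alt ibi_ms epoch_length_ms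
instance (ibi_ms : List Int) (epoch_length_ms : Int) (out : List (List Int)) : Decidable (Spec_split_ibi_epochs ibi_ms epoch_length_ms out) := by unfold Spec_split_ibi_epochs; infer_instance

-- ===== CLAIM (what is proved, stated in full; the proofs are below) =====
def Claim_equal_split_ibi_epochs : Prop := ∀ (ibi_ms : List Int) (epoch_length_ms : Int), Dom_split_ibi_epochs ibi_ms epoch_length_ms → Spec_split_ibi_epochs ibi_ms epoch_length_ms (split_ibi_epochs ibi_ms epoch_length_ms)

-- ===== LEMMAS AND PROOFS =====

def segs (l : List Int) : List Nat → Nat → List (List Int)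
  | [], _ => []
  | [a], n => [(l.drop a).take (n - a)]
  | a :: b :: t, n => (l.drop a).take (b - a) :: segs l (b :: t) n

lemma slice_pres (p : List Int) (x : Int) (a b : Nat) (hb : b ≤ p.length) :
    ((p ++ [x]).drop a).take (b - a) = (p.drop a).take (b - a) := by
  by_cases ha : a ≤ p.length
  · rw [List.drop_append_of_le_length ha, List.take_append_of_le_length]
    simp; omega
  · have : b - a = 0 := by omega
    simp [this]

lemma segs_keep (p : List Int) (x : Int) :
    ∀ (ns : List Nat) (E : List (List Int)) (c : List Int),
    (∀ k ∈ ns, k ≤ p.length) → segs p ns p.length = E ++ [c] →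
    segs (p ++ [x]) ns (p.length + 1) = E ++ [c ++ [x]]
  | [], E, c, hb, h => by simp [segs] at h
  | [a], E, c, hb, h => by
    have ha : a ≤ p.length := hb a (by simp)
    cases E with
    | nil =>
      simp only [segs, List.nil_append, List.cons.injEq, and_true] at h ⊢
      rw [List.drop_append_of_le_length ha]
      rw [List.take_of_length_le (by simp; omega)]
      rw [← h, List.take_of_length_le (by simp)]
    | cons e E' =>
      simp only [segs, List.cons_append, List.cons.injEq] at h
      exact absurd h.2.symm (by simp)
  | a :: b :: t, E, c, hb, h => by
    have hbp : b ≤ p.length := hb b (by simp)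
    cases E with
    | nil =>
      simp only [segs, List.nil_append, List.cons.injEq] at h
      rcases h with ⟨_, h2⟩
      cases t <;> simp [segs] at h2
    | cons e E' =>
      simp only [segs, List.cons_append, List.cons.injEq] at h ⊢
      refine ⟨by rw [slice_pres p x a b hbp]; exact h.1, ?_⟩
      refine segs_keep p x (b :: t) E' c (fun k hk => hb k ?_) h.2
      simp at hk ⊢; tauto

lemma segs_fresh (p : List Int) (x : Int) :
    ∀ (ns : List Nat) (E : List (List Int)) (c : List Int),
    (∀ k ∈ ns, k ≤ p.length) → segs p ns p.length = E ++ [c] →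
    segs (p ++ [x]) (ns ++ [p.length]) (p.length + 1) = (E ++ [c]) ++ [[x]]
  | [], E, c, hb, h => by simp [segs] at h
  | [a], E, c, hb, h => by
    have ha : a ≤ p.length := hb a (by simp)
    cases E with
    | nil =>
      simp only [segs, List.nil_append, List.cons.injEq, and_true] at h
      simp only [List.cons_append, List.nil_append, segs, List.cons.injEq]
      refine ⟨by rw [slice_pres p x a p.length (le_refl _)]; exact h, ?_⟩
      rw [List.drop_left, Nat.add_sub_cancel_left]
      simp
    | cons e E' =>
      simp only [segs, List.cons_append, List.cons.injEq] at h
      exact absurd h.2.symm (by simp)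
  | a :: b :: t, E, c, hb, h => by
    have hbp : b ≤ p.length := hb b (by simp)
    cases E with
    | nil =>
      simp only [segs, List.nil_append, List.cons.injEq] at h
      rcases h with ⟨_, h2⟩
      cases t <;> simp [segs] at h2
    | cons e E' =>
      simp only [segs, List.cons_append, List.cons.injEq] at h ⊢
      refine ⟨by rw [slice_pres p x a b hbp]; exact h.1, ?_⟩
      have := segs_fresh p x (b :: t) E' c (fun k hk => hb k (by simp at hk ⊢; tauto)) h.2
      simpa using this

def natsToInts (ns : List Nat) : List Int := ns.map (fun k => (k : Int))

lemma natsToInts_cons (a : Nat) (ns : List Nat) :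
    natsToInts (a :: ns) = (a : Int) :: natsToInts ns := rfl

lemma natsToInts_append (ns ms : List Nat) :
    natsToInts (ns ++ ms) = natsToInts ns ++ natsToInts ms := by simp [natsToInts]

def stepA (L : Int) (st : List (List Int) × List Int × Int) (x : Int) :
    List (List Int) × List Int × Int :=
  let new_sum := st.2.2 + x
  if new_sum > L then (st.1 ++ [st.2.1], [x], x) else (st.1, st.2.1 ++ [x], new_sum)

def stepB (L : Int) (s : List Int × Int) (ix : Int × Int) : List Int × Int :=
  if s.2 + ix.2 > L then (s.1 ++ [ix.1], ix.2) else (s.1, s.2 + ix.2)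

lemma loop (L : Int) :
    ∀ (rest p : List Int) (E : List (List Int)) (c : List Int) (s : Int) (ns : List Nat),
    c ≠ [] → (∀ k ∈ ns, k ≤ p.length) → segs p ns p.length = E ++ [c] →
    ∃ ms : List Nat,
      (PySem.List.enumerate rest (p.length : Int)).foldl (stepB L) (natsToInts ns, s) =
        (natsToInts ms, (rest.foldl (stepA L) (E, c, s)).2.2) ∧
      (∀ k ∈ ms, k ≤ (p ++ rest).length) ∧
      (rest.foldl (stepA L) (E, c, s)).2.1 ≠ [] ∧
      segs (p ++ rest) ms (p ++ rest).length =
        (rest.foldl (stepA L) (E, c, s)).1 ++ [(rest.foldl (stepA L) (E, c, s)).2.1] := by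
  intro rest
  induction rest with
  | nil =>
    intro p E c s ns hc hb hs
    exact ⟨ns, by simp [PySem.List.enumerate_nil], by simpa using hb, hc, by simpa using hs⟩
  | cons x rest ih =>
    intro p E c s ns hc hb hs
    rw [PySem.List.enumerate_cons]
    simp only [List.foldl_cons]
    by_cases hgt : s + x > L
    · have hstepB : stepB L (natsToInts ns, s) ((p.length : Int), x) =
          (natsToInts (ns ++ [p.length]), x) := by
        simp only [stepB]; rw [if_pos hgt, natsToInts_append]; rfl
      have hstepA : stepA L (E, c, s) x = (E ++ [c], [x], x) := by
        simp only [stepA]; rw [if_pos hgt]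
      rw [hstepB, hstepA]
      have hb' : ∀ k ∈ ns ++ [p.length], k ≤ (p ++ [x]).length := by
        intro k hk
        simp only [List.mem_append, List.mem_singleton] at hk
        rcases hk with hk | hk
        · simp; exact le_trans (hb k hk) (by omega)
        · simp [hk]
      have hs' := segs_fresh p x ns E c hb hs
      obtain ⟨ms, h1, h2, h3, h4⟩ :=
        ih (p ++ [x]) (E ++ [c]) [x] x (ns ++ [p.length]) (by simp) hb'
          (by simpa using hs')
      refine ⟨ms, ?_, ?_, h3, ?_⟩
      · rw [← h1]; norm_num
      · intro k hk; have := h2 k hk; simpa using this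
      · simpa using h4
    · have hstepB : stepB L (natsToInts ns, s) ((p.length : Int), x) =
          (natsToInts ns, s + x) := by
        simp only [stepB]; rw [if_neg hgt]
      have hstepA : stepA L (E, c, s) x = (E, c ++ [x], s + x) := by
        simp only [stepA]; rw [if_neg hgt]
      rw [hstepB, hstepA]
      have hb' : ∀ k ∈ ns, k ≤ (p ++ [x]).length := by
        intro k hk; simp; exact le_trans (hb k hk) (by omega)
      have hs' := segs_keep p x ns E c hb hs
      obtain ⟨ms, h1, h2, h3, h4⟩ :=
        ih (p ++ [x]) E (c ++ [x]) (s + x) ns (by simp) hb' (by simpa using hs')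
      refine ⟨ms, ?_, ?_, h3, ?_⟩
      · rw [← h1]; norm_num
      · intro k hk; have := h2 k hk; simpa using this
      · simpa using h4

lemma zip_slice (l : List Int) :
    ∀ (ms : List Nat),
    ((natsToInts ms).zip ((natsToInts ms).drop 1 ++ [(l.length : Int)])).map
      (fun ab => PySem.List.slice l (some ab.1) (some ab.2)) = segs l ms l.length
  | [] => by simp [segs, natsToInts]
  | [a] => by simp [segs, natsToInts, PySem.List.slice_natCast]
  | a :: b :: t => by
    have ih := zip_slice l (b :: t)
    rw [natsToInts_cons] at ih
    rw [natsToInts_cons, natsToInts_cons]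
    simp only [List.drop_succ_cons, List.drop_zero, List.cons_append, List.zip_cons_cons,
      List.map_cons, segs] at ih ⊢
    rw [ih, PySem.List.slice_natCast l a b]

lemma portA_eq (l : List Int) (L : Int) :
    split_ibi_epochs l L =
      (let st := l.foldl (stepA L) ([], [], 0);
       if st.2.1.length > 0 then st.1 ++ [st.2.1] else st.1) := rfl

lemma portB_eq (l : List Int) (L : Int) :
    split_ibi_epochs_alt l L =
      (if l = [] then []
       else
         let st := (PySem.List.enumerate l).foldl (stepB L) ([(0 : Int)], 0);
         ((st.1).zip ((st.1).drop 1 ++ [(l.length : Int)])).map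
           (fun ab => PySem.List.slice l (some ab.1) (some ab.2))) := rfl

theorem main_eq (l : List Int) (L : Int) : split_ibi_epochs l L = split_ibi_epochs_alt l L := by
  rw [portA_eq, portB_eq]
  cases l with
  | nil => simp
  | cons x t =>
    simp only [List.foldl_cons, if_neg (List.cons_ne_nil x t)]
    rw [show PySem.List.enumerate (x :: t) = PySem.List.enumerate (x :: t) 0 from rfl,
      PySem.List.enumerate_cons]
    simp only [List.foldl_cons, zero_add]
    by_cases hgt : (0 : Int) + x > L
    · have hA : stepA L ([], [], 0) x = ([[]], [x], x) := by
        simp only [stepA]; rw [if_pos hgt]; simp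
      have hB : stepB L ([(0 : Int)], 0) (0, x) = (natsToInts [0, 0], x) := by
        simp only [stepB]; rw [if_pos hgt]; simp [natsToInts]
      rw [hA, hB]
      obtain ⟨ms, h1, h2, h3, h4⟩ := loop L t [x] [[]] [x] x [0, 0]
        (by simp) (by intro k hk; simp at hk; simp [hk])
        (by simp [segs])
      have h1' : (PySem.List.enumerate t 1).foldl (stepB L) (natsToInts [0, 0], x) =
          (natsToInts ms, (t.foldl (stepA L) ([[]], [x], x)).2.2) := by
        simpa using h1
      rw [h1']
      rw [if_pos (by simpa [List.length_pos_iff] using h3)]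
      rw [show (x :: t : List Int) = [x] ++ t from rfl]
      rw [zip_slice ([x] ++ t) ms]
      exact (by simpa using h4 : segs ([x] ++ t) ms ([x] ++ t).length = _).symm
    · have hA : stepA L ([], [], 0) x = ([], [x], x) := by
        simp only [stepA]; rw [if_neg hgt]; simp
      have hB : stepB L ([(0 : Int)], 0) (0, x) = (natsToInts [0], x) := by
        simp only [stepB]; rw [if_neg hgt]; simp [natsToInts]
      rw [hA, hB]
      obtain ⟨ms, h1, h2, h3, h4⟩ := loop L t [x] [] [x] x [0]
        (by simp) (by intro k hk; simp at hk; simp [hk]) (by simp [segs])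
      have h1' : (PySem.List.enumerate t 1).foldl (stepB L) (natsToInts [0], x) =
          (natsToInts ms, (t.foldl (stepA L) ([], [x], x)).2.2) := by
        simpa using h1
      rw [h1']
      rw [if_pos (by simpa [List.length_pos_iff] using h3)]
      rw [show (x :: t : List Int) = [x] ++ t from rfl]
      rw [zip_slice ([x] ++ t) ms]
      exact (by simpa using h4 : segs ([x] ++ t) ms ([x] ++ t).length = _).symm

-- ===== VERDICT (by name: the statement is the Claim_ definition above) =====
theorem split_ibi_epochs_spec : Claim_equal_split_ibi_epochs := by
  intro ibi_ms epoch_length_ms _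
  unfold Spec_split_ibi_epochs
  exact main_eq ibi_ms epoch_length_ms
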